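-- pv_equiv track=rewrite | github.com/ggfincke/loom | src/loom_io/latex_handler.py | validate_basic_latex_syntax
-- ===== SOURCE A (Python) =====
-- def validate_basic_latex_syntax(text: str) -> bool:
--     # Check brace balance
--     brace_count = 0
--     for char in text:
--         if char == "{":
--             brace_count += 1
--         elif char == "}":
--             brace_count -= 1
--             if brace_count < 0:
--                 return False
--     if brace_count != 0:
--         return False
--
--     # Check document structure
--     has_begin = r"\begin{document}" in text
--     has_end = r"\end{document}" in text
--     if not (has_begin and has_end):
--         return False
--
--     return True
-- ===== SOURCE B (Python) =====
-- def _summary(text, lo, hi):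
--     # (unmatched '}' , unmatched '{') for text[lo:hi], by divide and conquer;
--     # combining (a1,b1),(a2,b2) cancels min(b1,a2) opener/closer pairs across the cut.
--     if hi - lo == 1:
--         c = text[lo]
--         return (1, 0) if c == "}" else (0, 1) if c == "{" else (0, 0)
--     if hi == lo:
--         return (0, 0)
--     mid = (lo + hi) // 2
--     a1, b1 = _summary(text, lo, mid)
--     a2, b2 = _summary(text, mid, hi)
--     m = min(b1, a2)
--     return (a1 + a2 - m, b1 + b2 - m)
--
--
-- def validate_basic_latex_syntax(text: str) -> bool:
--     # Braces are balanced (never-negative prefix, zero total) iff there is no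
--     # unmatched brace of either kind, i.e. the summary of the whole text is (0, 0).
--     return _summary(text, 0, len(text)) == (0, 0) \
--         and r"\begin{document}" in text and r"\end{document}" in text
-- ===== Notes on version B (the rewrite author's own statement) =====
-- stated objective: alternative
-- what changed: Replaces A's sequential early-return counter scan with divide-and-conquer bracket matching: each half of the string is summarized as a pair (unmatched closers, unmatched openers) and the two summaries are merged by cancelling min(openers_left, closers_right) pairs across the cut; the text is valid iff the whole-string summary is (0,0), plus the unchanged substring checks.
import Mathlib
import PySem

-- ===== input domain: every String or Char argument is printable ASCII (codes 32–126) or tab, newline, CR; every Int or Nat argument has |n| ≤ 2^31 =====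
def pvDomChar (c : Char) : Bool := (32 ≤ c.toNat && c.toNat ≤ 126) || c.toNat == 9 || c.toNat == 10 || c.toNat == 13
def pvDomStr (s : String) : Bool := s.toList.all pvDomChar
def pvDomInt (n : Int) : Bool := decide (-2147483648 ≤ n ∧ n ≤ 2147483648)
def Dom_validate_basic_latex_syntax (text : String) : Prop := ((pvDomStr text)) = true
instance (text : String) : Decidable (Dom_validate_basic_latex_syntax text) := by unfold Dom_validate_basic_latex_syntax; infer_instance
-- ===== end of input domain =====

-- B replaces A's sequential early-return counter with divide-and-conquer bracket
-- matching over (unmatched-closers, unmatched-openers) summaries merged at each cut.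

-- ===== PORT A =====
-- A's for-loop with early 'return False': none = early return, some b = loop fell through with count b
def pvLoopA : List Char → Int → Option Int
  | [], b => some b
  | c :: rest, b =>
    if c = '{' then pvLoopA rest (b + 1)
    else if c = '}' then
      if b - 1 < 0 then none else pvLoopA rest (b - 1)
    else pvLoopA rest b

def validate_basic_latex_syntax (text : String) : Bool :=
  match pvLoopA text.toList 0 with
  | none => false
  | some brace_count =>
    if brace_count ≠ 0 then false
    else
      let has_begin := PySem.Str.isIn "\\begin{document}" text
      let has_end := PySem.Str.isIn "\\end{document}" text
      if !(has_begin && has_end) then false else true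

-- ===== PORT B =====
-- _summary's length-1 base case: summary of one character
def pvUnit (c : Char) : Int × Int :=
  if c = '}' then (1, 0) else if c = '{' then (0, 1) else (0, 0)

-- merging two adjacent summaries: cancel min(b1, a2) pairs across the cut
def pvCombine (p q : Int × Int) : Int × Int :=
  let m := min p.2 q.1
  (p.1 + q.1 - m, p.2 + q.2 - m)

-- _summary(text, lo, hi) depends only on the slice text[lo:hi] and splits it at
-- floor(len/2) (since (lo+hi)//2 - lo = (hi-lo)//2), so it is ported on that slice.
def pvSummary (l : List Char) : Int × Int :=
  if h1 : l.length = 1 then pvUnit l.headI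
  else if h0 : l.length = 0 then (0, 0)
  else
    let mid := l.length / 2
    pvCombine (pvSummary (l.take mid)) (pvSummary (l.drop mid))
termination_by l.length
decreasing_by
  · simp only [List.length_take]; omega
  · simp only [List.length_drop]; omega

def validate_basic_latex_syntax_alt (text : String) : Bool :=
  decide (pvSummary text.toList = (0, 0)) &&
    PySem.Str.isIn "\\begin{document}" text && PySem.Str.isIn "\\end{document}" text

-- ===== PRECONDITION & SPEC =====
def Spec_validate_basic_latex_syntax (text : String) (out : Bool) : Prop := out = validate_basic_latex_syntax_alt text
instance (text : String) (out : Bool) : Decidable (Spec_validate_basic_latex_syntax text out) := by unfold Spec_validate_basic_latex_syntax; infer_instance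

-- ===== CLAIM (what is proved, stated in full; the proofs are below) =====
def Claim_equal_validate_basic_latex_syntax : Prop := ∀ (text : String), Dom_validate_basic_latex_syntax text → Spec_validate_basic_latex_syntax text (validate_basic_latex_syntax text)

-- ===== LEMMAS AND PROOFS =====

-- left fold of the summary monoid, used to bridge pvSummary and pvLoopA
def pvStep (p : Int × Int) (c : Char) : Int × Int := pvCombine p (pvUnit c)
def pvG (l : List Char) : Int × Int := l.foldl pvStep (0, 0)

lemma pvCombine_assoc (x y z : Int × Int) :
    pvCombine (pvCombine x y) z = pvCombine x (pvCombine y z) := by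
  simp only [pvCombine, Prod.ext_iff]
  omega

lemma pvUnit_nonneg (c : Char) : 0 ≤ (pvUnit c).1 ∧ 0 ≤ (pvUnit c).2 := by
  simp only [pvUnit]; split_ifs <;> simp

lemma pvUnit_open : pvUnit '{' = (0, 1) := by decide
lemma pvUnit_close : pvUnit '}' = (1, 0) := by decide

lemma pvG_nonneg (l : List Char) : 0 ≤ (pvG l).1 ∧ 0 ≤ (pvG l).2 := by
  suffices h : ∀ p : Int × Int, 0 ≤ p.1 → 0 ≤ p.2 →
      0 ≤ (l.foldl pvStep p).1 ∧ 0 ≤ (l.foldl pvStep p).2 from h (0,0) le_rfl le_rfl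
  induction l with
  | nil => intro p h1 h2; exact ⟨h1, h2⟩
  | cons c rest ih =>
    intro p h1 h2
    apply ih
    · have := pvUnit_nonneg c
      simp only [pvStep, pvCombine]; omega
    · have := pvUnit_nonneg c
      simp only [pvStep, pvCombine]; omega

lemma pvFoldl_combine (l : List Char) : ∀ x : Int × Int, 0 ≤ x.2 →
    l.foldl pvStep x = pvCombine x (pvG l) := by
  induction l with
  | nil =>
    intro x hx
    simp only [List.foldl_nil, pvG, pvCombine]
    have : min x.2 (0:Int) = 0 := by omega
    simp [this]
  | cons c rest ih =>
    intro x hx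
    have hu := pvUnit_nonneg c
    have hstep2 : 0 ≤ (pvStep x c).2 := by
      simp only [pvStep, pvCombine]; omega
    have h1 : rest.foldl pvStep (pvStep x c) = pvCombine (pvStep x c) (pvG rest) :=
      ih _ hstep2
    have h2 : pvG (c :: rest) = pvCombine (pvUnit c) (pvG rest) := by
      have hu2 : (0:Int) ≤ (pvUnit c).2 := hu.2
      simp only [pvG, List.foldl_cons]
      have : pvStep (0,0) c = pvUnit c := by
        simp only [pvStep, pvCombine]
        have : min (0:Int) (pvUnit c).1 = 0 := by have := pvUnit_nonneg c; omega
        simp [this]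
      rw [this]
      exact ih _ hu2
    simp only [List.foldl_cons, h2, ← pvCombine_assoc]
    exact h1

lemma pvSummary_eq_pvG (l : List Char) : pvSummary l = pvG l := by
  fun_induction pvSummary l with
  | case1 l h1 =>
    match l, h1 with
    | [c], _ =>
      simp only [pvG, List.foldl, pvStep, pvCombine, List.headI]
      have := pvUnit_nonneg c
      have : min (0:Int) (pvUnit c).1 = 0 := by omega
      simp [this]
  | case2 l h1 h0 =>
    match l, h0 with
    | [], _ => simp [pvG]
  | case3 l h1 h0 mid ih1 ih2 =>
    rw [ih1, ih2]
    have := pvFoldl_combine (l.drop (l.length / 2)) (pvG (l.take (l.length / 2)))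
      (pvG_nonneg _).2
    rw [← this]
    simp only [pvG]
    rw [← List.foldl_append, List.take_append_drop]

-- Relates A's early-return loop to the summary fold from any nonnegative state.
lemma pvMono (l : List Char) : ∀ a b : Int, 0 ≤ b →
    a ≤ (l.foldl pvStep (a, b)).1 ∧ 0 ≤ (l.foldl pvStep (a, b)).2 := by
  induction l with
  | nil => intro a b hb; exact ⟨le_rfl, hb⟩
  | cons c rest ih =>
    intro a b hb
    have hu := pvUnit_nonneg c
    have hst : pvStep (a, b) c = ((a, b).1 + (pvUnit c).1 - min b (pvUnit c).1,
        (a, b).2 + (pvUnit c).2 - min b (pvUnit c).1) := by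
      simp [pvStep, pvCombine]
    simp only [List.foldl_cons, hst]
    have h := ih (a + (pvUnit c).1 - min b (pvUnit c).1)
      (b + (pvUnit c).2 - min b (pvUnit c).1) (by omega)
    constructor
    · calc a ≤ a + (pvUnit c).1 - min b (pvUnit c).1 := by omega
        _ ≤ _ := h.1
    · exact h.2

lemma pvKey (l : List Char) : ∀ a b : Int, 0 ≤ b →
    (match pvLoopA l b with
     | none => a < (l.foldl pvStep (a, b)).1
     | some v => l.foldl pvStep (a, b) = (a, v)) := by
  induction l with
  | nil => intro a b _; simp [pvLoopA]
  | cons c rest ih =>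
    intro a b hb
    simp only [pvLoopA, List.foldl_cons]
    by_cases h1 : c = '{'
    · have hst : pvStep (a, b) c = (a, b + 1) := by
        simp only [h1, pvStep, pvUnit_open, pvCombine]
        norm_num
        omega
      rw [if_pos h1, hst]
      exact ih a (b + 1) (by omega)
    · by_cases h2 : c = '}'
      · rw [if_neg h1, if_pos h2]
        by_cases h3 : b - 1 < 0
        · have hb0 : b = 0 := by omega
          have hst : pvStep (a, b) c = (a + 1, 0) := by
            simp only [h2, hb0, pvStep, pvUnit_close, pvCombine]
            norm_num
          rw [if_pos h3, hst]
          have := pvMono rest (a + 1) 0 le_rfl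
          simp only []
          omega
        · have hst : pvStep (a, b) c = (a, b - 1) := by
            simp only [h2, pvStep, pvUnit_close, pvCombine]
            norm_num
            omega
          rw [if_neg h3, hst]
          exact ih a (b - 1) (by omega)
      · have hst : pvStep (a, b) c = (a, b) := by
          simp only [pvStep, pvUnit, pvCombine, if_neg h1, if_neg h2]
          norm_num
          omega
        rw [if_neg h1, if_neg h2, hst]
        exact ih a b hb

-- ===== VERDICT (by name: the statement is the Claim_ definition above) =====
theorem validate_basic_latex_syntax_spec : Claim_equal_validate_basic_latex_syntax := by
  intro text _
  unfold Spec_validate_basic_latex_syntax validate_basic_latex_syntax validate_basic_latex_syntax_alt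
  rw [pvSummary_eq_pvG]
  have h := pvKey text.toList 0 0 le_rfl
  cases hA : pvLoopA text.toList 0 with
  | none =>
    rw [hA] at h
    have : pvG text.toList ≠ (0, 0) := by
      intro he
      rw [show (text.toList.foldl pvStep (0, 0)) = pvG text.toList from rfl, he] at h
      exact absurd h (by norm_num)
    simp [this]
  | some v =>
    rw [hA] at h
    have hG : pvG text.toList = (0, v) := h
    by_cases hv : v = 0
    · subst hv
      simp [hG]
    · have : pvG text.toList ≠ (0, 0) := by
        rw [hG]; simp [hv]
      simp [this, hv]
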